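-- pv_equiv track=rewrite | github.com/doyelee0313/CS2109S | ps3/utils.py | invert_board
-- ===== SOURCE A (Python) =====
-- import copy
--
-- Board = list[list[str]]
--
-- def invert_board(board: Board, in_place: bool = True) -> Board:
--     """
--     Inverts the board by modifying existing values if in_place is set to True,
--     or creating a new board with updated values if in_place is set to False.
--     """
--     if not in_place:
--         board = copy.deepcopy(board)
--     board.reverse()
--     for r, row in enumerate(board):
--         for c, tile in enumerate(row):
--             if tile == "W":
--                 board[r][c] = "B"
--             elif tile == "B":
--                 board[r][c] = "W"
--     return board
-- ===== SOURCE B (Python) =====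
-- SWAP = {"W": "B", "B": "W"}
--
-- def invert_board(board, in_place=True):
--     """Structural recursion: invert(rest) followed by the flipped first row,
--     with the tile swap done by a dict lookup instead of an if/elif chain."""
--     def rec(rows):
--         if not rows:
--             return []
--         return rec(rows[1:]) + [[SWAP.get(t, t) for t in rows[0]]]
--     out = rec(board)
--     if in_place:
--         board[:] = out
--         return board
--     return out
-- ===== Notes on version B (the rewrite author's own statement) =====
-- stated objective: alternative
-- what changed: Replaces list.reverse() plus a separate in-place nested flip loop by a structural recursion (invert of tail, then the flipped head row appended) with the W/B swap done via a translation dict; note A mutates the caller's inner row lists while B rebinds board[:] to fresh rows, so only the return value is claimed equal.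
import Mathlib
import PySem

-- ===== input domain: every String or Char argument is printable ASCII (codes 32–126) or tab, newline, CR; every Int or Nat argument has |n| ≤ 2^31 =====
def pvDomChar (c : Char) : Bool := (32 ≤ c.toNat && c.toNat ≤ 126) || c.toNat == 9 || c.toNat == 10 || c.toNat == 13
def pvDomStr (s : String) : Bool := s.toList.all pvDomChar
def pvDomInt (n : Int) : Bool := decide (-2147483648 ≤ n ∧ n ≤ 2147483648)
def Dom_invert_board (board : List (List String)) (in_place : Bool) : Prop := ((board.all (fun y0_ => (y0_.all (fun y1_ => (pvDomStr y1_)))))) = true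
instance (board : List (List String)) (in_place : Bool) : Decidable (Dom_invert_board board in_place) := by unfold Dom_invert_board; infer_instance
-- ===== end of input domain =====

-- B replaces reverse()+nested flip loop by structural recursion with a translation dict; return-value equivalence only (A mutates the caller's inner rows, B rebinds board[:] to fresh rows).


-- ===== PORT A =====
-- A: reverse the board, then the nested enumerate loop flips each W/B tile in place.
def flipTile (t : String) : String :=
  if t == "W" then "B" else if t == "B" then "W" else t

def invert_board (board : List (List String)) (in_place : Bool) : List (List String) :=
  -- `if not in_place: board = copy.deepcopy(board)` only affects aliasing, not the value
  let b := board.reverse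
  b.map (fun row => row.map flipTile)

-- ===== PORT B =====
-- B: recursion rec(rows) = rec(rest) ++ [flipped head row], swap via the SWAP dict.
def swapDict : PySem.Dict String String := PySem.Dict.ofList [("W", "B"), ("B", "W")]

def invertRec : List (List String) → List (List String)
  | [] => []
  | row :: rest => invertRec rest ++ [row.map (fun t => PySem.Dict.getD swapDict t t)]

def invert_board_alt (board : List (List String)) (in_place : Bool) : List (List String) :=
  invertRec board

-- ===== PRECONDITION & SPEC =====
def Spec_invert_board (board : List (List String)) (in_place : Bool) (out : List (List String)) : Prop := out = invert_board_alt board in_place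
instance (board : List (List String)) (in_place : Bool) (out : List (List String)) : Decidable (Spec_invert_board board in_place out) := by unfold Spec_invert_board; infer_instance

-- ===== CLAIM (what is proved, stated in full; the proofs are below) =====
def Claim_equal_invert_board : Prop := ∀ (board : List (List String)) (in_place : Bool), Dom_invert_board board in_place → Spec_invert_board board in_place (invert_board board in_place)

-- ===== LEMMAS AND PROOFS =====
theorem swapDict_getD (t : String) : PySem.Dict.getD swapDict t t = flipTile t := by
  by_cases h1 : t = "W"
  · subst h1; rfl
  by_cases h2 : t = "B"
  · subst h2; rfl
  have hw : (("W" : String) == t) = false := beq_eq_false_iff_ne.mpr (Ne.symm h1)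
  have hb : (("B" : String) == t) = false := beq_eq_false_iff_ne.mpr (Ne.symm h2)
  simp [swapDict, flipTile, PySem.Dict.getD, PySem.Dict.get?, PySem.Dict.ofList,
        PySem.Dict.update, PySem.Dict.empty, PySem.Dict.insert,
        List.find?, hw, hb, h1, h2]

theorem invertRec_eq (rows : List (List String)) :
    invertRec rows = rows.reverse.map (fun row => row.map flipTile) := by
  induction rows with
  | nil => rfl
  | cons row rest ih =>
      simp [invertRec, ih, swapDict_getD]

-- ===== VERDICT (by name: the statement is the Claim_ definition above) =====
theorem invert_board_spec : Claim_equal_invert_board := by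
  intro board in_place _
  unfold Spec_invert_board invert_board invert_board_alt
  simp [invertRec_eq]
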